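-- pv_equiv track=rewrite | github.com/chandlerbing65nm/FreqSubAlign | misc/plot_accuracy_progression.py | _find_loss_key
-- ===== SOURCE A (Python) =====
-- from typing import Any, Dict, List, Tuple
--
-- def _find_loss_key(losses: Dict[str, List[float]], keyword: str) -> str | None:
--     """Find a loss key containing keyword (case-insensitive). Returns first match or None."""
--     kw = keyword.lower()
--     for name in sorted(losses.keys()):
--         if kw in name.lower():
--             return name
--     # Fallback exact common names
--     if keyword in losses:
--         return keyword
--     return None
-- ===== SOURCE B (Python) =====
-- from typing import Any, Dict, List, Tuple
--
-- def _find_loss_key(losses: Dict[str, List[float]], keyword: str) -> str | None: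
--     """Find a loss key containing keyword (case-insensitive). Returns first match or None."""
--     kw = keyword.lower()
--     best = None
--     for name in losses:
--         if kw in name.lower() and (best is None or name < best):
--             best = name
--     if best is not None:
--         return best
--     # Fallback exact common names
--     if keyword in losses:
--         return keyword
--     return None
-- ===== Notes on version B (the rewrite author's own statement) =====
-- stated objective: alternative
-- what changed: Replaces sorting all keys and scanning for the first match with a single unsorted pass that maintains a running-best accumulator (the smallest matching key seen so far), so no sort or intermediate list is built.
import Mathlib
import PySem

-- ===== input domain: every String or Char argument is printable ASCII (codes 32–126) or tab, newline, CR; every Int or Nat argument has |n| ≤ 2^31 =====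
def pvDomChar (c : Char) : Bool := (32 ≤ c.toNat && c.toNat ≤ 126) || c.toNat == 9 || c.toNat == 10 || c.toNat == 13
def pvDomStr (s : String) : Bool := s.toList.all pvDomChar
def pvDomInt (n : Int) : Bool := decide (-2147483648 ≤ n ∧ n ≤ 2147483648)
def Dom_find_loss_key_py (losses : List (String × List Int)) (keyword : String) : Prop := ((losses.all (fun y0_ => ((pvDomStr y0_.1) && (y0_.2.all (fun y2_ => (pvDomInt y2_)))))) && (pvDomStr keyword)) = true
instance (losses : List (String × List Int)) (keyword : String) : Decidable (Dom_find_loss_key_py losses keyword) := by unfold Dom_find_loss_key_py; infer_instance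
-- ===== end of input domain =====

-- B replaces A's sort-all-keys-then-scan with one unsorted pass keeping a running-best
-- (smallest matching key so far) accumulator; objective: alternative decomposition, no sort.


-- ===== PORT A =====
def find_loss_key_py (losses : List (String × List Int)) (keyword : String) : Option String :=
  let kw := PySem.Str.lower keyword
  match (PySem.List.sorted (losses.map (·.1)) (fun x => x) false).find?
      (fun name => PySem.Str.isIn kw (PySem.Str.lower name)) with
  | some name => some name
  | none =>
    if (losses.map (·.1)).contains keyword then some keyword else none

-- ===== PORT B =====
-- loop body of Source B: `if kw in name.lower() and (best is None or name < best): best = name`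
def pvBestStep (kw : String) (best : Option String) (name : String) : Option String :=
  if PySem.Str.isIn kw (PySem.Str.lower name)
      && (match best with | none => true | some b => decide (name < b)) then
    some name
  else best

def find_loss_key_py_alt (losses : List (String × List Int)) (keyword : String) : Option String :=
  let kw := PySem.Str.lower keyword
  let best := losses.foldl (fun best pr => pvBestStep kw best pr.1) none
  match best with
  | some b => some b
  | none =>
    if (losses.map (·.1)).contains keyword then some keyword else none

-- ===== PRECONDITION & SPEC =====
def Spec_find_loss_key_py (losses : List (String × List Int)) (keyword : String) (out : Option String) : Prop := out = find_loss_key_py_alt losses keyword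
instance (losses : List (String × List Int)) (keyword : String) (out : Option String) : Decidable (Spec_find_loss_key_py losses keyword out) := by unfold Spec_find_loss_key_py; infer_instance

-- ===== CLAIM (what is proved, stated in full; the proofs are below) =====
def Claim_equal_find_loss_key_py : Prop := ∀ (losses : List (String × List Int)) (keyword : String), Dom_find_loss_key_py losses keyword → Spec_find_loss_key_py losses keyword (find_loss_key_py losses keyword)

-- ===== LEMMAS AND PROOFS =====

-- find? is the head of the filtered list (shape of A's early-return scan)
theorem pv_find_eq_head_filter {α : Type} (p : α → Bool) (l : List α) :
    l.find? p = (l.filter p).head? := by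
  induction l with
  | nil => rfl
  | cons x t ih =>
    by_cases h : p x
    · rw [List.find?_cons_of_pos h, List.filter_cons_of_pos h]; rfl
    · rw [List.find?_cons_of_neg h, List.filter_cons_of_neg h]; exact ih

-- first match in the sorted key list = min of the matching keys
theorem pv_sorted_find_eq_min (p : String → Bool) (ks : List String) :
    (PySem.List.sorted ks (fun x => x) false).find? p =
    PySem.List.min? (ks.filter p) (fun x => x) := by
  have hperm := (PySem.List.sorted_perm ks (fun x => x) false).filter p
  rw [pv_find_eq_head_filter]
  rcases hm : PySem.List.min? (ks.filter p) (fun x => x) with _ | ⟨m⟩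
  · rw [PySem.List.min?_eq_none_iff] at hm
    rw [hm] at hperm
    simp [List.Perm.eq_nil hperm]
  · have hmm : m ∈ (PySem.List.sorted ks (fun x => x) false).filter p :=
      hperm.mem_iff.mpr (PySem.List.min?_mem hm)
    have hpw : List.Pairwise (fun a b : String => a ≤ b)
        ((PySem.List.sorted ks (fun x => x) false).filter p) :=
      (PySem.List.sorted_pairwise ks (fun x => x)).filter p
    rcases hcons : (PySem.List.sorted ks (fun x => x) false).filter p with _ | ⟨a, t⟩
    · rw [hcons] at hmm; simp at hmm
    · rw [hcons] at hmm hpw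
      have hle1 : a ≤ m := by
        rcases List.mem_cons.mp hmm with rfl | hmt
        · exact le_refl _
        · exact (List.pairwise_cons.mp hpw).1 m hmt
      have hamem : a ∈ ks.filter p := by
        refine hperm.mem_iff.mp ?_
        rw [hcons]; exact List.mem_cons_self
      have hle2 : m ≤ a := PySem.List.min?_isMin hm a hamem
      simp [le_antisymm hle2 hle1]

-- the running-best loop, started from some b, is a running min over the matches
theorem pv_fold_step_some (kw : String) (l : List String) (b : String) :
    l.foldl (pvBestStep kw) (some b) =
    some ((l.filter (fun name => PySem.Str.isIn kw (PySem.Str.lower name))).foldl min b) := by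
  induction l generalizing b with
  | nil => rfl
  | cons a t ih =>
    by_cases h : PySem.Str.isIn kw (PySem.Str.lower a)
    · simp only [List.filter_cons, List.foldl_cons, pvBestStep, h, Bool.true_and, if_true]
      by_cases hab : a < b
      · rw [if_pos (by simp [hab]), ih, min_eq_right hab.le]
      · rw [if_neg (by simp [hab]), ih, min_eq_left (not_lt.mp hab)]
    · simp only [List.filter_cons, List.foldl_cons, pvBestStep, h, Bool.false_and]
      exact ih b

-- the running-best loop computes min() of the matching keys
theorem pv_fold_step_none (kw : String) (l : List String) :
    l.foldl (pvBestStep kw) none =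
    PySem.List.min? (l.filter (fun name => PySem.Str.isIn kw (PySem.Str.lower name))) (fun x => x) := by
  induction l with
  | nil => rfl
  | cons a t ih =>
    by_cases h : PySem.Str.isIn kw (PySem.Str.lower a)
    · simp only [List.filter_cons, List.foldl_cons, pvBestStep, h, Bool.true_and, if_true]
      rw [pv_fold_step_some, PySem.List.min?_id_cons]
    · simp only [List.filter_cons, List.foldl_cons, pvBestStep, h, Bool.false_and]
      exact ih

-- the pair-level loop of the port = min() of the matching keys
theorem pv_fold_pairs (kw : String) (losses : List (String × List Int)) :
    losses.foldl (fun best pr => pvBestStep kw best pr.1) none =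
    PySem.List.min? ((losses.map (·.1)).filter (fun name => PySem.Str.isIn kw (PySem.Str.lower name))) (fun x => x) := by
  rw [← pv_fold_step_none, List.foldl_map]

-- ===== VERDICT (by name: the statement is the Claim_ definition above) =====
theorem find_loss_key_py_spec : Claim_equal_find_loss_key_py := by
  intro losses keyword _
  show find_loss_key_py losses keyword = find_loss_key_py_alt losses keyword
  simp only [find_loss_key_py, find_loss_key_py_alt, pv_sorted_find_eq_min, pv_fold_pairs]
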